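-- pv_equiv track=rewrite | github.com/gitsame/testrepo2 | test.py | count_intervals
-- ===== SOURCE A (Python) =====
-- from collections import defaultdict
-- from bisect import bisect_left
--
-- def count_intervals(sequence, intervals):
--     count = defaultdict(int)
--     intervals.sort()
--     for item in sequence:
--         pos = bisect_left(intervals, item)
--         if pos == len(intervals):
--             count[None] += 1
--         else:
--             count[intervals[pos]] += 1
--     return count
-- ===== SOURCE B (Python) =====
-- from collections import defaultdict
--
-- def count_intervals(sequence, intervals):
--     # two-pointer merge sweep over sorted distinct items instead of per-item bisect
--     intervals.sort()
--     n = len(intervals)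
--     assign = {}
--     ptr = 0
--     for item in sorted(set(sequence)):
--         while ptr < n and intervals[ptr] < item:
--             ptr += 1
--         assign[item] = intervals[ptr] if ptr < n else None
--     count = defaultdict(int)
--     for item in sequence:
--         count[assign[item]] += 1
--     return count
-- ===== Notes on version B (the rewrite author's own statement) =====
-- stated objective: alternative
-- what changed: Replaces the per-item binary search (bisect_left for every sequence element) by a single two-pointer merge sweep: distinct items are sorted once and one pointer walks the sorted intervals, assigning each distinct item its nearest interval, then a plain counting pass over the sequence uses that map.
import Mathlib
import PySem

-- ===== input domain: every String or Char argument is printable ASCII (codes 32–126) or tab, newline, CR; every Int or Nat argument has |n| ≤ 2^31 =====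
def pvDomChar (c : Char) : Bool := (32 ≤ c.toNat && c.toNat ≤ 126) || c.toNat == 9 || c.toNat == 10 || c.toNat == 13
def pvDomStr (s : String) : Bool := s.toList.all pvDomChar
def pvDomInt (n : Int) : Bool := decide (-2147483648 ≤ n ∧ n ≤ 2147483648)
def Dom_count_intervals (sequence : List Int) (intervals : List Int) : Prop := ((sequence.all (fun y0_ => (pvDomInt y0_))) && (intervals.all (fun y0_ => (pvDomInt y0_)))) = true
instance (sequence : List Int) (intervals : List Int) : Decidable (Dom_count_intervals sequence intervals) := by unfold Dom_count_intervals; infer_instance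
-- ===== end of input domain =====

-- B replaces the per-item binary search by a two-pointer merge sweep over the sorted distinct
-- items (objective: alternative). Both Pythons sort `intervals` in place; the equivalence proved
-- here is about the return value (B performs the same mutation).

-- ===== PORT A =====
def count_intervals (sequence : List Int) (intervals : List Int) : List (Option Int × Int) :=
  let ivs := PySem.List.sorted intervals (fun x => x) false   -- intervals.sort()
  (sequence.foldl (fun (count : PySem.Dict (Option Int) Int) item =>
      let pos := PySem.List.bisectLeft ivs item
      -- Python tests `pos == len(intervals)`; bisect_left never exceeds the length, so
      -- `pos < length` is the same split (else-branch first here to name the bound h)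
      if h : pos < ivs.length then count.modify (some ivs[pos]) 0 (· + 1)
      else count.modify none 0 (· + 1))
    PySem.Dict.empty).items

-- ===== PORT B =====
-- the inner `while ptr < n and intervals[ptr] < item: ptr += 1` loop of Source B
def ciAdvance (ivs : List Int) (x : Int) (ptr : Nat) : Nat :=
  if h : ptr < ivs.length then
    if ivs[ptr] < x then ciAdvance ivs x (ptr + 1) else ptr
  else ptr
termination_by ivs.length - ptr

-- one iteration of Source B's first loop: advance the pointer, record item's nearest interval
def ciStep (ivs : List Int) (st : PySem.Dict Int (Option Int) × Nat) (item : Int) :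
    PySem.Dict Int (Option Int) × Nat :=
  let ptr := ciAdvance ivs item st.2
  (st.1.insert item (if h : ptr < ivs.length then some ivs[ptr] else none), ptr)

def count_intervals_alt (sequence : List Int) (intervals : List Int) : List (Option Int × Int) :=
  let ivs := PySem.List.sorted intervals (fun x => x) false   -- intervals.sort()
  -- for item in sorted(set(sequence)): … assign[item] = …
  let st := (PySem.List.sorted (PySem.Set.ofList sequence) (fun x => x) false).foldl
      (ciStep ivs) (PySem.Dict.empty, 0)
  (sequence.foldl (fun (count : PySem.Dict (Option Int) Int) item =>
      -- assign[item]: every element of sequence is a key of assign, so the default is unreachable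
      let key := (st.1.get? item).getD none
      count.modify key 0 (· + 1))
    PySem.Dict.empty).items

-- ===== PRECONDITION & SPEC =====
def Spec_count_intervals (sequence : List Int) (intervals : List Int) (out : List (Option Int × Int)) : Prop := out = count_intervals_alt sequence intervals
instance (sequence : List Int) (intervals : List Int) (out : List (Option Int × Int)) : Decidable (Spec_count_intervals sequence intervals out) := by unfold Spec_count_intervals; infer_instance

-- ===== CLAIM (what is proved, stated in full; the proofs are below) =====
def Claim_equal_count_intervals : Prop := ∀ (sequence : List Int) (intervals : List Int), Dom_count_intervals sequence intervals → Spec_count_intervals sequence intervals (count_intervals sequence intervals)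

-- ===== LEMMAS AND PROOFS =====

-- the key A's loop body counts: the first interval ≥ item (as an Option)
def ciKey (ivs : List Int) (x : Int) : Option Int :=
  if h : PySem.List.bisectLeft ivs x < ivs.length then some ivs[PySem.List.bisectLeft ivs x] else none

theorem ci_bisect_unique (ivs : List Int) (x : Int)
    (hs : ivs.Pairwise (· ≤ ·)) (r : Nat) (hr : r ≤ ivs.length)
    (h1 : ∀ j (_ : j < ivs.length), j < r → ivs[j] < x)
    (h2 : ∀ h : r < ivs.length, x ≤ ivs[r]) :
    r = PySem.List.bisectLeft ivs x := by
  obtain ⟨hb1, hb2, hb3⟩ := PySem.List.bisectLeft_spec ivs x hs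
  rcases lt_trichotomy r (PySem.List.bisectLeft ivs x) with h | h | h
  · have hrl : r < ivs.length := lt_of_lt_of_le h hb1
    have := hb2 r hrl h
    have := h2 hrl
    omega
  · exact h
  · have hbl : PySem.List.bisectLeft ivs x < ivs.length := lt_of_lt_of_le h hr
    have := hb3 _ hbl le_rfl
    have := h1 _ hbl h
    omega

theorem ciAdvance_eq_bisect (ivs : List Int) (x : Int) (hs : ivs.Pairwise (· ≤ ·)) :
    ∀ p : Nat, p ≤ ivs.length → (∀ j (_ : j < ivs.length), j < p → ivs[j] < x) →
    ciAdvance ivs x p = PySem.List.bisectLeft ivs x := by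
  have H : ∀ (n p : Nat), ivs.length - p = n → p ≤ ivs.length →
      (∀ j (_ : j < ivs.length), j < p → ivs[j] < x) →
      ciAdvance ivs x p = PySem.List.bisectLeft ivs x := by
    intro n
    induction n with
    | zero =>
        intro p hn hp hpre
        have hpl : p = ivs.length := by omega
        rw [ciAdvance]
        simp only [hpl, lt_irrefl, dite_false]
        exact ci_bisect_unique ivs x hs _ le_rfl (fun j hj _ => hpre j hj (by omega))
          (fun h => absurd h (lt_irrefl _))
    | succ n ih =>
        intro p hn hp hpre
        have hplt : p < ivs.length := by omega
        rw [ciAdvance]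
        simp only [hplt, dite_true]
        by_cases hlt : ivs[p] < x
        · simp only [hlt, if_true]
          exact ih (p + 1) (by omega) (by omega)
            (fun j hj hjp => by
              rcases Nat.lt_succ_iff_lt_or_eq.1 hjp with h | h
              · exact hpre j hj h
              · subst h; exact hlt)
        · simp only [hlt, if_false]
          exact ci_bisect_unique ivs x hs p (le_of_lt hplt) hpre
            (fun h => le_of_not_gt hlt)
  exact fun p => H (ivs.length - p) p rfl

theorem ciFold_get?_of_not_mem (ivs : List Int) :
    ∀ (items : List Int) (st : PySem.Dict Int (Option Int) × Nat) (y : Int), y ∉ items →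
    (items.foldl (ciStep ivs) st).1.get? y = st.1.get? y := by
  intro items
  induction items with
  | nil => intro st y _; rfl
  | cons x rest ih =>
      intro st y hy
      simp only [List.mem_cons, not_or] at hy
      rw [List.foldl_cons, ih _ y hy.2]
      exact PySem.Dict.get?_insert_of_ne _ _ hy.1

theorem ciFold_get? (ivs : List Int) (hs : ivs.Pairwise (· ≤ ·)) :
    ∀ (items : List Int), items.Pairwise (· ≤ ·) →
    ∀ (d : PySem.Dict Int (Option Int)) (p : Nat), p ≤ ivs.length →
    (∀ j (_ : j < ivs.length), j < p → ∀ z ∈ items, ivs[j] < z) →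
    ∀ y ∈ items, (items.foldl (ciStep ivs) (d, p)).1.get? y = some (ciKey ivs y) := by
  intro items
  induction items with
  | nil => intro _ _ _ _ _ y hy; exact absurd hy (List.not_mem_nil)
  | cons x rest ih =>
      intro hpair d p hp hpre y hy
      obtain ⟨hx_le, hrest⟩ := List.pairwise_cons.1 hpair
      have hadv : ciAdvance ivs x p = PySem.List.bisectLeft ivs x :=
        ciAdvance_eq_bisect ivs x hs p hp
          (fun j hj hjp => hpre j hj hjp x (List.mem_cons_self))
      obtain ⟨hb1, hb2, _⟩ := PySem.List.bisectLeft_spec ivs x hs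
      have hstep : ciStep ivs (d, p) x = (d.insert x (ciKey ivs x), PySem.List.bisectLeft ivs x) := by
        simp only [ciStep, hadv, ciKey]
      rw [List.foldl_cons, hstep]
      by_cases hyr : y ∈ rest
      · exact ih hrest _ _ hb1
          (fun j hj hjb z hz => lt_of_lt_of_le (hb2 j hj hjb) (hx_le z hz)) y hyr
      · have hyx : y = x := by
          rcases List.mem_cons.1 hy with h | h
          · exact h
          · exact absurd h hyr
        rw [ciFold_get?_of_not_mem ivs rest _ y hyr, hyx,
          PySem.Dict.get?_insert_self]

-- ===== VERDICT (by name: the statement is the Claim_ definition above) =====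
theorem count_intervals_spec : Claim_equal_count_intervals := by
  intro sequence intervals _
  unfold Spec_count_intervals count_intervals count_intervals_alt
  have hs : (PySem.List.sorted intervals (fun x => x) false).Pairwise (· ≤ ·) :=
    PySem.List.sorted_pairwise intervals (fun x => x)
  have hps : (PySem.List.sorted (PySem.Set.ofList sequence) (fun x => x) false).Pairwise (· ≤ ·) :=
    PySem.List.sorted_pairwise (PySem.Set.ofList sequence) (fun x => x)
  apply congrArg PySem.Dict.items
  apply PySem.List.foldl_congr_mem
  intro acc item hmem
  have hmi : item ∈ PySem.List.sorted (PySem.Set.ofList sequence) (fun x => x) false :=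
    (PySem.List.mem_sorted _ _ _ _).2 ((PySem.Set.mem_ofList _ _).2 hmem)
  have hget := ciFold_get? (PySem.List.sorted intervals (fun x => x) false) hs
    (PySem.List.sorted (PySem.Set.ofList sequence) (fun x => x) false) hps
    PySem.Dict.empty 0 (Nat.zero_le _) (fun j hj hj0 => absurd hj0 (Nat.not_lt_zero j))
    item hmi
  simp only [hget, Option.getD_some]
  by_cases h : PySem.List.bisectLeft (PySem.List.sorted intervals (fun x => x) false) item <
      (PySem.List.sorted intervals (fun x => x) false).length
  · simp only [h, dite_true, ciKey]
  · simp only [h, dite_false, ciKey]
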